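-- pv_equiv track=rewrite | github.com/socathie/CodeFights | Tournaments/firstOperationCharacter.py | firstOperationCharacter
-- ===== SOURCE A (Python) =====
-- def firstOperationCharacter(expr):
--
--     balance = 0
--     maxAdditionPriority = -1
--     maxMultiplicationPriority = -1
--     additionIndex = -1
--     multiplicationIndex = -1
--
--     for i in range(len(expr)):
--         if expr[i] == '(':
--             balance += 1
--         if expr[i] == ')':
--             balance -= 1
--         if expr[i] == '+':
--             if balance > maxAdditionPriority:
--                 maxAdditionPriority = balance
--                 additionIndex = i
--         if expr[i] == '*':
--             if balance > maxMultiplicationPriority: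
--                 maxMultiplicationPriority = balance
--                 multiplicationIndex = i
--
--     if maxAdditionPriority > maxMultiplicationPriority:
--         return additionIndex
--     else:
--         return multiplicationIndex
-- ===== SOURCE B (Python) =====
-- def firstOperationCharacter(expr):
--     # balance table: balance value in effect at each index (after processing parens at i)
--     balances = []
--     b = 0
--     for c in expr:
--         if c == '(':
--             b += 1
--         elif c == ')':
--             b -= 1
--         balances.append(b)
--
--     def best(op):
--         bi, bb = -1, -1
--         for i, c in enumerate(expr):
--             if c == op and balances[i] > bb:
--                 bb, bi = balances[i], i
--         return bi, bb
--
--     ai, ab = best('+')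
--     mi, mb = best('*')
--     return ai if ab > mb else mi
-- ===== Notes on version B (the rewrite author's own statement) =====
-- stated objective: alternative
-- what changed: Replaces A's single fused scan maintaining five variables with a precomputed balance table followed by two independent selection passes (best '+' index by balance, best '*' index by balance) and a final comparison.
import Mathlib
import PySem

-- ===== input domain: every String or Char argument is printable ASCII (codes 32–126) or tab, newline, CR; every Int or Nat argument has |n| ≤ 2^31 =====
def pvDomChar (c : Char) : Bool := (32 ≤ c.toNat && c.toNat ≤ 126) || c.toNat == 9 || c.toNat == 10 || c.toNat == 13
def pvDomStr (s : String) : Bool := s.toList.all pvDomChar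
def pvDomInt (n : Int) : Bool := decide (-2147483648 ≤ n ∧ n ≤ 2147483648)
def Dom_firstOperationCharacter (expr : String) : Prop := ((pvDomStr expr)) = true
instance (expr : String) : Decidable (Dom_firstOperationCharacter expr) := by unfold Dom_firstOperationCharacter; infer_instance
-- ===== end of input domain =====

-- B replaces A's fused single scan with a balance table plus two independent selection passes; objective: alternative decomposition (same cost).

-- ===== PORT A =====
-- A's loop over range(len(expr)) with five state variables, branches in source order.
def fOCgoA : List Char → Int → Int → Int → Int → Int → Int → Int
  | [], _, _, ma, mm, ai, mi => if ma > mm then ai else mi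
  | c :: cs, i, bal, ma, mm, ai, mi =>
    let bal := if c = '(' then bal + 1 else bal
    let bal := if c = ')' then bal - 1 else bal
    let p : Int × Int := if c = '+' ∧ bal > ma then (bal, i) else (ma, ai)
    let m : Int × Int := if c = '*' ∧ bal > mm then (bal, i) else (mm, mi)
    fOCgoA cs (i + 1) bal p.1 m.1 p.2 m.2

def firstOperationCharacter (expr : String) : Int :=
  fOCgoA expr.toList 0 0 (-1) (-1) (-1) (-1)

-- ===== PORT B =====
-- balance table: running '(' minus ')' count, value in effect at each index
def balTable : List Char → Int → List Int
  | [], _ => []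
  | c :: cs, b =>
    let b' := if c = '(' then b + 1 else if c = ')' then b - 1 else b
    b' :: balTable cs b'

-- B's best(op): scan (char, balance) pairs, keep earliest index with greatest balance
def bestGo (op : Char) : List (Char × Int) → Int → Int → Int → Int × Int
  | [], _, bi, bb => (bi, bb)
  | (c, bal) :: rest, i, bi, bb =>
    if c = op ∧ bal > bb then bestGo op rest (i + 1) i bal
    else bestGo op rest (i + 1) bi bb

def firstOperationCharacter_alt (expr : String) : Int :=
  let pairs := expr.toList.zip (balTable expr.toList 0)
  let p := bestGo '+' pairs 0 (-1) (-1)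
  let m := bestGo '*' pairs 0 (-1) (-1)
  if p.2 > m.2 then p.1 else m.1

-- ===== PRECONDITION & SPEC =====
def Spec_firstOperationCharacter (expr : String) (out : Int) : Prop := out = firstOperationCharacter_alt expr
instance (expr : String) (out : Int) : Decidable (Spec_firstOperationCharacter expr out) := by unfold Spec_firstOperationCharacter; infer_instance

-- ===== CLAIM (what is proved, stated in full; the proofs are below) =====
def Claim_equal_firstOperationCharacter : Prop := ∀ (expr : String), Dom_firstOperationCharacter expr → Spec_firstOperationCharacter expr (firstOperationCharacter expr)

-- ===== LEMMAS AND PROOFS =====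
lemma fOCgoA_eq_best (cs : List Char) :
    ∀ (i b ma mm ai mi : Int),
    fOCgoA cs i b ma mm ai mi =
      (let pairs := cs.zip (balTable cs b)
       let p := bestGo '+' pairs i ai ma
       let m := bestGo '*' pairs i mi mm
       if p.2 > m.2 then p.1 else m.1) := by
  induction cs with
  | nil => intro i b ma mm ai mi; simp [fOCgoA, balTable, bestGo]
  | cons c cs ih =>
    intro i b ma mm ai mi
    simp only [fOCgoA, balTable, List.zip_cons_cons, bestGo]
    have hb : (if c = ')' then (if c = '(' then b + 1 else b) - 1 else if c = '(' then b + 1 else b)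
        = (if c = '(' then b + 1 else if c = ')' then b - 1 else b) := by
      by_cases h1 : c = '(' <;> by_cases h2 : c = ')' <;> simp_all
    rw [hb]
    set b' := (if c = '(' then b + 1 else if c = ')' then b - 1 else b) with hb'
    by_cases hp : c = '+' ∧ b' > ma <;> by_cases hm : c = '*' ∧ b' > mm
    · exact absurd (hp.1 ▸ hm.1) (by decide)
    · simp only [if_pos hp, if_neg hm, ih]
    · simp only [if_neg hp, if_pos hm, ih]
    · simp only [if_neg hp, if_neg hm, ih]

-- ===== VERDICT (by name: the statement is the Claim_ definition above) =====
theorem firstOperationCharacter_spec : Claim_equal_firstOperationCharacter := by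
  intro expr _
  unfold Spec_firstOperationCharacter firstOperationCharacter firstOperationCharacter_alt
  exact fOCgoA_eq_best expr.toList 0 0 (-1) (-1) (-1) (-1)
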